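-- pv_equiv track=rewrite | github.com/sgl-project/sglang | test/registered/rl/test_return_routed_experts.py | compare_baseline_w_reference
-- ===== SOURCE A (Python) =====
-- def compare_baseline_w_reference(baseline, reference):
--     num_total_mismatches = 0
--     for baseline_seq, reference_seq in zip(baseline, reference):
--         for bsl_token, ref_token in zip(baseline_seq, reference_seq):
--             for bsl_topk, ref_topk in zip(bsl_token, ref_token):
--                 len_bsl, len_ref = len(bsl_topk), len(ref_topk)
--                 set_bsl, set_ref = set(bsl_topk), set(ref_topk)
--                 if set_bsl != set_ref:
--                     num_total_mismatches += len(set_bsl - set_ref)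
--                 if (len_bsl != len_ref) or (len_bsl != len(set_bsl)):
--                     raise ValueError(
--                         f"Duplicates experts ids found: Baseline({len_bsl}): {bsl_topk} vs Reference({len_ref}): {ref_topk}"
--                     )
--     return num_total_mismatches
-- ===== SOURCE B (Python) =====
-- def _num_missing(bsl_topk, ref_topk):
--     # Validate this topk pair (same message, same first-offender order as the original).
--     len_bsl, len_ref = len(bsl_topk), len(ref_topk)
--     if len_bsl != len_ref or len_bsl != len(set(bsl_topk)):
--         raise ValueError(
--             f"Duplicates experts ids found: Baseline({len_bsl}): {bsl_topk} vs Reference({len_ref}): {ref_topk}"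
--         )
--     # Count baseline ids missing from the reference by a sorted two-pointer merge
--     # (no set algebra: baseline ids are duplicate-free after validation, so the number
--     # of merge misses equals |set(bsl) - set(ref)|).
--     sb, sr = sorted(bsl_topk), sorted(ref_topk)
--     i = j = missing = 0
--     while i < len(sb):
--         if j < len(sr) and sr[j] < sb[i]:
--             j += 1
--         elif j < len(sr) and sr[j] == sb[i]:
--             i += 1
--         else:
--             missing += 1
--             i += 1
--     return missing
--
--
-- def compare_baseline_w_reference(baseline, reference):
--     return sum(
--         _num_missing(b, r)
--         for bseq, rseq in zip(baseline, reference)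
--         for btok, rtok in zip(bseq, rseq)
--         for b, r in zip(btok, rtok)
--     )
-- ===== Notes on version B (the rewrite author's own statement) =====
-- stated objective: alternative
-- what changed: Replaces A's hash-set algebra (build set(bsl), set(ref), compare, take the set difference) inside a fused guarded-accumulator triple loop by a per-leaf sort-and-two-pointer merge that counts baseline ids absent from the reference (correct because validation guarantees duplicate-free baseline topks), summed over a flat comprehension; the redundant set-inequality guard disappears.
import Mathlib
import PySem

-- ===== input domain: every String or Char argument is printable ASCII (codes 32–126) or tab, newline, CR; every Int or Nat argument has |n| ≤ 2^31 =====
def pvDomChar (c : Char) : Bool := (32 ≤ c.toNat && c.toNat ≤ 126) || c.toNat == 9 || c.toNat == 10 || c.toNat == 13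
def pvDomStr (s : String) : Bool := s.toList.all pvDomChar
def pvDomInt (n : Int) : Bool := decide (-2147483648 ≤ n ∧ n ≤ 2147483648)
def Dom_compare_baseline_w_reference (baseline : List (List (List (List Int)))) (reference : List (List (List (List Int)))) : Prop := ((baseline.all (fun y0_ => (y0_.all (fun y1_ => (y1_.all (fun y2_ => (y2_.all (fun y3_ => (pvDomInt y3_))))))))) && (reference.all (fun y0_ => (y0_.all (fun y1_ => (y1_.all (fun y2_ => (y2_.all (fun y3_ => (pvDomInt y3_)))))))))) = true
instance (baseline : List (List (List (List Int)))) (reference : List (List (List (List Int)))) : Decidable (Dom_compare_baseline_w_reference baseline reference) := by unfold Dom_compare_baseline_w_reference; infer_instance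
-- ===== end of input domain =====

-- B replaces A's per-leaf hash-set algebra inside a fused guarded-accumulator triple loop by a
-- per-leaf sort + two-pointer merge count summed over a flat comprehension; objective: alternative.
-- Equivalence is about the RETURN value on Pre_ (where neither Python raises).

-- ===== PORT A =====
-- Literal port of A's triple-nested loop. The 'raise' branch aborts the Python; those inputs
-- are excluded by Pre_ below, so the port simply continues accumulating there.
def compare_baseline_w_reference (baseline : List (List (List (List Int)))) (reference : List (List (List (List Int)))) : Int :=
  (baseline.zip reference).foldl (fun acc p =>
    (p.1.zip p.2).foldl (fun acc q =>
      (q.1.zip q.2).foldl (fun acc t =>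
        let set_bsl := PySem.Set.ofList t.1
        let set_ref := PySem.Set.ofList t.2
        if ¬ (PySem.Set.equal set_bsl set_ref = true) then
          acc + ((PySem.Set.diff set_bsl set_ref).length : Int)
        else acc) acc) acc) 0

-- ===== PORT B =====
-- Source B's while loop over indices i, j, missing (fixed sorted lists sb, sr), as the obvious
-- recursion over the same state; branches in the same order.
def pvTwoPtrGo (sb sr : List Int) (i j : Nat) (missing : Int) : Int :=
  if h : i < sb.length then
    if h1 : j < sr.length ∧ sr.getD j 0 < sb.getD i 0 then
      pvTwoPtrGo sb sr i (j + 1) missing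
    else if h2 : j < sr.length ∧ sr.getD j 0 = sb.getD i 0 then
      pvTwoPtrGo sb sr (i + 1) j missing
    else
      pvTwoPtrGo sb sr (i + 1) j (missing + 1)
  else missing
termination_by (sb.length - i) + (sr.length - j)
decreasing_by
  · omega
  · omega
  · omega

-- _num_missing's value (its raise branch is excluded by Pre_): sort both topks, two-pointer count.
def pvNumMissing (b r : List Int) : Int :=
  pvTwoPtrGo (PySem.List.sorted b (fun x => x) false) (PySem.List.sorted r (fun x => x) false) 0 0 0

-- Port of Source B's compare_baseline_w_reference: one flat sum over the comprehension.
def compare_baseline_w_reference_alt (baseline : List (List (List (List Int)))) (reference : List (List (List (List Int)))) : Int :=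
  ((baseline.zip reference).flatMap (fun p =>
    (p.1.zip p.2).flatMap (fun q =>
      (q.1.zip q.2).map (fun t => pvNumMissing t.1 t.2)))).sum

-- ===== PRECONDITION & SPEC =====
-- Pre_ excludes exactly the inputs on which A raises ValueError: some zipped leaf pair with a
-- length mismatch or a duplicate id in the baseline topk.
def Pre_compare_baseline_w_reference (baseline : List (List (List (List Int)))) (reference : List (List (List (List Int)))) : Prop :=
  ∀ p ∈ baseline.zip reference, ∀ q ∈ p.1.zip p.2, ∀ t ∈ q.1.zip q.2,
    t.1.length = t.2.length ∧ t.1.Nodup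
instance (baseline : List (List (List (List Int)))) (reference : List (List (List (List Int)))) : Decidable (Pre_compare_baseline_w_reference baseline reference) := by unfold Pre_compare_baseline_w_reference; infer_instance

def pvWitness_compare_baseline_w_reference : List (List (List (List Int))) × List (List (List (List Int))) :=
  ([[[[1, 2], [3]]]], [[[[2, 5], [3]]]])

def Spec_compare_baseline_w_reference (baseline : List (List (List (List Int)))) (reference : List (List (List (List Int)))) (out : Int) : Prop := out = compare_baseline_w_reference_alt baseline reference
instance (baseline : List (List (List (List Int)))) (reference : List (List (List (List Int)))) (out : Int) : Decidable (Spec_compare_baseline_w_reference baseline reference out) := by unfold Spec_compare_baseline_w_reference; infer_instance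

-- ===== CLAIM =====
def Claim_equal_compare_baseline_w_reference : Prop := ∀ (baseline : List (List (List (List Int)))) (reference : List (List (List (List Int)))), Dom_compare_baseline_w_reference baseline reference → Pre_compare_baseline_w_reference baseline reference → Spec_compare_baseline_w_reference baseline reference (compare_baseline_w_reference baseline reference)

-- ===== LEMMAS AND PROOFS =====

-- A's leaf contribution
def pvLeaf (t : List Int × List Int) : Int :=
  ((PySem.Set.diff (PySem.Set.ofList t.1) (PySem.Set.ofList t.2)).length : Int)

-- if the two sets are equal, the difference is empty, so the guard in A is redundant
lemma pvLeaf_zero_of_equal (t : List Int × List Int)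
    (h : PySem.Set.equal (PySem.Set.ofList t.1) (PySem.Set.ofList t.2) = true) :
    pvLeaf t = 0 := by
  have hnil : PySem.Set.diff (PySem.Set.ofList t.1) (PySem.Set.ofList t.2) = [] := by
    rw [List.eq_nil_iff_forall_not_mem]
    intro x hx
    rw [PySem.Set.mem_diff] at hx
    exact hx.2 (((PySem.Set.equal_iff _ _).1 h x).1 hx.1)
  simp [pvLeaf, hnil]

lemma pvFoldl_leaf (l : List (List Int × List Int)) (acc : Int) :
    l.foldl (fun acc t =>
      let set_bsl := PySem.Set.ofList t.1
      let set_ref := PySem.Set.ofList t.2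
      if ¬ (PySem.Set.equal set_bsl set_ref = true) then
        acc + ((PySem.Set.diff set_bsl set_ref).length : Int)
      else acc) acc
    = acc + (l.map pvLeaf).sum := by
  induction l generalizing acc with
  | nil => simp
  | cons t l ih =>
    simp only [List.foldl_cons, List.map_cons, List.sum_cons]
    by_cases h : PySem.Set.equal (PySem.Set.ofList t.1) (PySem.Set.ofList t.2) = true
    · simp only [h, not_true, if_false, ih, pvLeaf_zero_of_equal t h]
      ring
    · simp only [h, ih]
      simp [pvLeaf]
      ring

lemma pvFoldl_add_sum {α : Type} (g : α → Int) (l : List α) (acc : Int) :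
    l.foldl (fun acc x => acc + g x) acc = acc + (l.map g).sum := by
  induction l generalizing acc with
  | nil => simp
  | cons x l ih => simp [ih]; ring

lemma pvFoldl_token (l : List (List (List Int) × List (List Int))) (acc : Int) :
    l.foldl (fun acc q =>
      (q.1.zip q.2).foldl (fun acc t =>
        let set_bsl := PySem.Set.ofList t.1
        let set_ref := PySem.Set.ofList t.2
        if ¬ (PySem.Set.equal set_bsl set_ref = true) then
          acc + ((PySem.Set.diff set_bsl set_ref).length : Int)
        else acc) acc) acc
    = acc + (l.map (fun q => ((q.1.zip q.2).map pvLeaf).sum)).sum := by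
  induction l generalizing acc with
  | nil => simp
  | cons q l ih =>
    simp only [List.foldl_cons, List.map_cons, List.sum_cons, pvFoldl_leaf]
    rw [pvFoldl_add_sum]
    ring

lemma pvFoldl_seq (l : List (List (List (List Int)) × List (List (List Int)))) (acc : Int) :
    l.foldl (fun acc p =>
      (p.1.zip p.2).foldl (fun acc q =>
        (q.1.zip q.2).foldl (fun acc t =>
          let set_bsl := PySem.Set.ofList t.1
          let set_ref := PySem.Set.ofList t.2
          if ¬ (PySem.Set.equal set_bsl set_ref = true) then
            acc + ((PySem.Set.diff set_bsl set_ref).length : Int)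
          else acc) acc) acc) acc
    = acc + (l.map (fun p => ((p.1.zip p.2).map (fun q => ((q.1.zip q.2).map pvLeaf).sum)).sum)).sum := by
  induction l generalizing acc with
  | nil => simp
  | cons p l ih =>
    simp only [List.foldl_cons, List.map_cons, List.sum_cons, pvFoldl_token]
    rw [pvFoldl_add_sum]
    ring

lemma pvSum_flatMap {α : Type} (f : α → List Int) (l : List α) :
    (l.flatMap f).sum = (l.map (fun x => (f x).sum)).sum := by
  induction l with
  | nil => simp
  | cons x l ih => simp [List.flatMap_cons, List.sum_append, ih]

-- every element of a sorted list's suffix is at least the suffix's head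
lemma pvHead_le (l : List Int) (hl : l.Pairwise (· ≤ ·)) (k : Nat) (hk : k < l.length) :
    ∀ x ∈ l.drop k, l[k] ≤ x := by
  have hP : (l.drop k).Pairwise (· ≤ ·) := hl.drop
  rw [List.drop_eq_getElem_cons hk] at hP
  intro x hx
  rw [List.drop_eq_getElem_cons hk] at hx
  rcases List.mem_cons.1 hx with h | h
  · exact le_of_eq h.symm
  · exact (List.pairwise_cons.1 hP).1 x h

lemma pvNotContains (l : List Int) (v : Int) (h : ∀ x ∈ l, v < x) : l.contains v = false := by
  rw [List.contains_eq_mem, decide_eq_false_iff_not]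
  intro hv
  exact absurd rfl (ne_of_lt (h v hv))

-- two-pointer correctness: on nondecreasing lists it adds the number of sb-suffix elements
-- missing from the sr-suffix
lemma pvTwoPtrGo_spec (sb sr : List Int) (i j : Nat) (m : Int)
    (hsb : sb.Pairwise (· ≤ ·)) (hsr : sr.Pairwise (· ≤ ·)) :
    pvTwoPtrGo sb sr i j m
      = m + (((sb.drop i).filter (fun x => !(sr.drop j).contains x)).length : Int) := by
  induction i, j, m using pvTwoPtrGo.induct sb sr with
  | case1 i j m h h1 ih =>
    rw [pvTwoPtrGo, dif_pos h, dif_pos h1, ih]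
    have hgj : sr.getD j 0 = sr[j]'h1.1 := List.getD_eq_getElem sr 0 h1.1
    have hgi : sb.getD i 0 = sb[i]'h := List.getD_eq_getElem sb 0 h
    have hfe : (sb.drop i).filter (fun x => !(sr.drop j).contains x)
        = (sb.drop i).filter (fun x => !(sr.drop (j+1)).contains x) := by
      refine List.filter_congr fun x hx => ?_
      have hlt : sr[j]'h1.1 < x :=
        lt_of_lt_of_le (hgj ▸ hgi ▸ h1.2) (pvHead_le sb hsb i h x hx)
      rw [List.drop_eq_getElem_cons h1.1, List.contains_cons]
      have : (x == sr[j]'h1.1) = false := by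
        rw [beq_eq_false_iff_ne]
        exact (ne_of_lt hlt).symm
      rw [this]
      simp
    rw [hfe]
  | case2 i j m h h1 h2 ih =>
    rw [pvTwoPtrGo, dif_pos h, dif_neg h1, dif_pos h2, ih]
    have hgj : sr.getD j 0 = sr[j]'h2.1 := List.getD_eq_getElem sr 0 h2.1
    have hgi : sb.getD i 0 = sb[i]'h := List.getD_eq_getElem sb 0 h
    have hmem : (sr.drop j).contains (sb[i]'h) = true := by
      rw [List.contains_eq_mem, decide_eq_true_iff, List.drop_eq_getElem_cons h2.1]
      exact List.mem_cons.2 (Or.inl (by rw [← hgj, ← hgi, h2.2]))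
    rw [List.drop_eq_getElem_cons h, List.filter_cons]
    simp only [hmem, Bool.not_true, if_neg (by simp : ¬ (false = true))]
  | case3 i j m h h1 h2 ih =>
    rw [pvTwoPtrGo, dif_pos h, dif_neg h1, dif_neg h2, ih]
    have hgi : sb.getD i 0 = sb[i]'h := List.getD_eq_getElem sb 0 h
    have hmem : (sr.drop j).contains (sb[i]'h) = false := by
      by_cases hj : j < sr.length
      · have hgj : sr.getD j 0 = sr[j]'hj := List.getD_eq_getElem sr 0 hj
        have hlt : sb[i]'h < sr[j]'hj := by
          rcases lt_trichotomy (sr[j]'hj) (sb[i]'h) with hc | hc | hc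
          · exact absurd ⟨hj, by rw [hgj, hgi]; exact hc⟩ h1
          · exact absurd ⟨hj, by rw [hgj, hgi]; exact hc⟩ h2
          · exact hc
        refine pvNotContains _ _ fun x hx => ?_
        exact lt_of_lt_of_le hlt (pvHead_le sr hsr j hj x hx)
      · rw [List.drop_eq_nil_of_le (le_of_not_gt hj)]
        rfl
    rw [List.drop_eq_getElem_cons h, List.filter_cons]
    simp only [hmem, Bool.not_false, if_true, List.length_cons]
    push_cast
    ring
  | case4 i j m h =>
    rw [pvTwoPtrGo, dif_neg h]
    rw [List.drop_eq_nil_of_le (le_of_not_gt h)]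
    simp

lemma pvNumMissing_eq (b r : List Int) :
    pvNumMissing b r = ((b.filter (fun x => !r.contains x)).length : Int) := by
  unfold pvNumMissing
  rw [pvTwoPtrGo_spec _ _ _ _ _ (PySem.List.sorted_pairwise b (fun x => x) )
        (PySem.List.sorted_pairwise r (fun x => x))]
  rw [List.drop_zero, List.drop_zero, zero_add]
  have hfe : (PySem.List.sorted b (fun x => x) false).filter
        (fun x => !(PySem.List.sorted r (fun x => x) false).contains x)
      = (PySem.List.sorted b (fun x => x) false).filter (fun x => !r.contains x) := by
    refine List.filter_congr fun x _ => ?_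
    rw [List.contains_eq_mem, List.contains_eq_mem]
    congr 1
    simp [PySem.List.mem_sorted]
  rw [hfe]
  exact congrArg _ (((PySem.List.sorted_perm b (fun x => x) false).filter _).length_eq)

lemma pvLeaf_eq (t : List Int × List Int) (hb : t.1.Nodup) :
    pvLeaf t = pvNumMissing t.1 t.2 := by
  rw [pvNumMissing_eq, pvLeaf]
  refine congrArg _ (List.Perm.length_eq ?_)
  refine (List.perm_ext_iff_of_nodup (PySem.Set.nodup_diff _ _ (PySem.Set.nodup_ofList t.1)) (hb.filter _)).2 fun a => ?_
  simp [PySem.Set.mem_diff, PySem.Set.mem_ofList, List.mem_filter, List.contains_eq_mem]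

-- ===== VERDICT =====
theorem compare_baseline_w_reference_spec : Claim_equal_compare_baseline_w_reference := by
  intro baseline reference _ hpre
  unfold Spec_compare_baseline_w_reference compare_baseline_w_reference compare_baseline_w_reference_alt
  rw [pvFoldl_seq, zero_add, pvSum_flatMap]
  refine congrArg List.sum (List.map_congr_left fun p hp => ?_)
  rw [pvSum_flatMap]
  refine congrArg List.sum (List.map_congr_left fun q hq => ?_)
  refine congrArg List.sum (List.map_congr_left fun t ht => ?_)
  exact pvLeaf_eq t (hpre p hp q hq t ht).2
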